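-- pv_equiv track=rewrite | github.com/ndtands/Algorithm_and_data_structer | Final_Semeter/greedy.py | Toy
-- ===== SOURCE A (Python) =====
-- def Toy(arr,coin):
--     i=0
--     arr.sort()
--     A=[]
--     while coin >= 0:
--         if i>=len(arr):
--             break
--         if coin - arr[i]>=0:
--             A.append(arr[i])
--             coin -= arr[i]
--         i+=1
--     return A,len(A)
-- ===== SOURCE B (Python) =====
-- from bisect import bisect_right
-- from itertools import accumulate
--
-- def Toy(arr, coin):
--     # sorts arr in place like the original; equivalence is about the return value.
--     # Binary search is valid: prefix sums of the sorted list are partitioned at the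
--     # first sum exceeding coin (that step's element is positive, all later ones larger).
--     arr.sort()
--     prefix = list(accumulate(arr))
--     k = bisect_right(prefix, coin) if coin >= 0 else 0
--     return arr[:k], k
-- ===== Notes on version B (the rewrite author's own statement) =====
-- stated objective: alternative
-- what changed: Replaces the decrement-greedy budget loop by a table-and-search algorithm: build the prefix-sum table of the sorted list with itertools.accumulate, locate the cutoff with bisect_right binary search (valid because the prefix sums are partitioned at the first sum exceeding coin: that step's element is positive and later elements are larger), and return arr[:k], k.
import Mathlib
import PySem

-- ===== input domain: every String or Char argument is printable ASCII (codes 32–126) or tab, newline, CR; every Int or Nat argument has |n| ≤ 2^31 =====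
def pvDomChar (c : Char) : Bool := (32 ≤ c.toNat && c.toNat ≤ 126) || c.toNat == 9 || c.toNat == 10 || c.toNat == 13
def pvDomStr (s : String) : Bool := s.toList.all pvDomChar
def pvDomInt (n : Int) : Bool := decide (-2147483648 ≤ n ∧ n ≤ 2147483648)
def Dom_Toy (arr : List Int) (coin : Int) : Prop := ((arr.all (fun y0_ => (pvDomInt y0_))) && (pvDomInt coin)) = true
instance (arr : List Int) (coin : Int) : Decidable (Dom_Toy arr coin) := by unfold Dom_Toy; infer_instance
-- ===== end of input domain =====

-- B replaces A's decrement-greedy budget loop by prefix-sum table + bisect_right binary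
-- search for the cutoff; equivalence is about the return value (both sort arr in place
-- in Python).

-- ===== PORT A =====
-- the while loop: i advances over the sorted list, coin decreases, A accumulates picks
def ToyLoopA : List Int → Int → List Int → List Int
  | l, coin, acc =>
    if coin ≥ 0 then
      match l with
      | [] => acc
      | x :: rest =>
        if coin - x ≥ 0 then ToyLoopA rest (coin - x) (acc ++ [x])
        else ToyLoopA rest coin acc
    else acc

def Toy (arr : List Int) (coin : Int) : List Int × Int :=
  let s := PySem.List.sorted arr (fun x => x) false
  let A := ToyLoopA s coin []
  (A, (A.length : Int))

-- ===== PORT B =====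
-- itertools.accumulate(arr) with running sum a
def ToyAccum : Int → List Int → List Int
  | _, [] => []
  | a, x :: r => (a + x) :: ToyAccum (a + x) r

-- bisect.bisect_right(a, x) with lo = 0, hi = len(a): the while lo < hi loop
def BisectLoop (a : List Int) (x : Int) (lo hi : Nat) : Nat :=
  if _h : lo < hi then
    let mid := (lo + hi) / 2
    if x < a.getD mid 0 then BisectLoop a x lo mid
    else BisectLoop a x (mid + 1) hi
  else lo
termination_by hi - lo
decreasing_by all_goals omega

def Toy_alt (arr : List Int) (coin : Int) : List Int × Int :=
  let s := PySem.List.sorted arr (fun x => x) false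
  let pfx := ToyAccum 0 s
  let k := if coin ≥ 0 then BisectLoop pfx coin 0 pfx.length else 0
  (s.take k, (k : Int))

-- ===== PRECONDITION & SPEC =====
def Spec_Toy (arr : List Int) (coin : Int) (out : List Int × Int) : Prop := out = Toy_alt arr coin
instance (arr : List Int) (coin : Int) (out : List Int × Int) : Decidable (Spec_Toy arr coin out) := by unfold Spec_Toy; infer_instance

-- ===== CLAIM (what is proved, stated in full; the proofs are below) =====
def Claim_equal_Toy : Prop := ∀ (arr : List Int) (coin : Int), Dom_Toy arr coin → Spec_Toy arr coin (Toy arr coin)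

-- ===== LEMMAS AND PROOFS =====

-- ghost cutoff: the number of leading prefix sums ≤ coin (first-exceed semantics)
def CutSpec (coin : Int) : List Int → Nat
  | [] => 0
  | p :: ps => if p > coin then 0 else 1 + CutSpec coin ps

theorem ToyLoopA_acc (l : List Int) : ∀ (coin : Int) (acc : List Int),
    ToyLoopA l coin acc = acc ++ ToyLoopA l coin [] := by
  induction l with
  | nil => intro coin acc; simp [ToyLoopA]
  | cons x rest ih =>
    intro coin acc
    simp only [ToyLoopA]
    split_ifs with h1 h2
    · rw [ih (coin - x) (acc ++ [x]), ih (coin - x) ([] ++ [x])]; simp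
    · exact ih coin acc
    · simp

theorem ToyLoopA_skip (l : List Int) : ∀ (coin : Int) (acc : List Int),
    (∀ y ∈ l, y > coin) → ToyLoopA l coin acc = acc := by
  induction l with
  | nil => intro coin acc _; simp [ToyLoopA]
  | cons x rest ih =>
    intro coin acc h
    have hx : x > coin := h x (by simp)
    simp only [ToyLoopA]
    split_ifs with h1 h2
    · omega
    · exact ih coin acc (fun y hy => h y (by simp [hy]))
    · rfl

theorem ToyAccum_length (a : Int) (l : List Int) : (ToyAccum a l).length = l.length := by
  induction l generalizing a with
  | nil => simp [ToyAccum]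
  | cons x r ih => simp [ToyAccum, ih]

theorem CutSpec_le (coin : Int) (l : List Int) : CutSpec coin l ≤ l.length := by
  induction l with
  | nil => simp [CutSpec]
  | cons p ps ih =>
    simp only [CutSpec]
    split_ifs with h
    · simp
    · simp; omega

theorem CutSpec_accum (l : List Int) : ∀ (coin a : Int),
    CutSpec coin (ToyAccum a l) = CutSpec (coin - a) (ToyAccum 0 l) := by
  induction l with
  | nil => intro coin a; simp [ToyAccum, CutSpec]
  | cons x r ih =>
    intro coin a
    simp only [ToyAccum, CutSpec]
    split_ifs with h1 h2 <;>
      first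
        | rfl
        | omega
        | (rw [ih coin (a + x), ih (coin - a) (0 + x)]
           have e : coin - (a + x) = coin - a - (0 + x) := by omega
           rw [e])

theorem ToyLoopA_eq_take (l : List Int) : ∀ (coin : Int),
    l.Pairwise (· ≤ ·) → 0 ≤ coin →
    ToyLoopA l coin [] = l.take (CutSpec coin (ToyAccum 0 l)) := by
  induction l with
  | nil => intro coin _ _; simp [ToyLoopA]
  | cons x rest ih =>
    intro coin hp hc
    have hx : ∀ y ∈ rest, x ≤ y := (List.pairwise_cons.mp hp).1
    have hpr : rest.Pairwise (· ≤ ·) := (List.pairwise_cons.mp hp).2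
    simp only [ToyLoopA, ToyAccum, CutSpec, if_pos hc]
    by_cases hfit : coin - x ≥ 0
    · have hnot : ¬ (0 + x > coin) := by omega
      simp only [if_pos hfit, if_neg hnot]
      rw [ToyLoopA_acc, ih (coin - x) hpr (by omega)]
      rw [CutSpec_accum rest coin (0 + x)]
      have : coin - (0 + x) = coin - x := by omega
      rw [this]
      rw [Nat.add_comm, List.take_succ_cons]; simp
    · have hgt : 0 + x > coin := by omega
      simp only [if_neg hfit, if_pos hgt]
      rw [ToyLoopA_skip rest coin [] (fun y hy => by have := hx y hy; omega)]
      simp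

-- below the first exceeder, every prefix sum is ≤ coin
theorem CutSpec_below (coin : Int) (l : List Int) :
    ∀ i, i < CutSpec coin l → l.getD i 0 ≤ coin := by
  induction l with
  | nil => simp [CutSpec]
  | cons p ps ih =>
    intro i hi
    simp only [CutSpec] at hi
    split_ifs at hi with h
    · omega
    · cases i with
      | zero => simpa using by omega
      | succ j => simpa using ih j (by omega)

-- once the running sum exceeds coin, all later accumulated sums over positives exceed it
theorem accum_pos_exceed (coin : Int) (r : List Int) :
    ∀ (b : Int), (∀ y ∈ r, 0 < y) → b > coin →
    ∀ i, i < r.length → (ToyAccum b r).getD i 0 > coin := by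
  induction r with
  | nil => intro b _ _ i hi; simp at hi
  | cons y r' ih =>
    intro b hpos hb i hi
    have hy : 0 < y := hpos y (by simp)
    cases i with
    | zero => simp [ToyAccum]; omega
    | succ j =>
      simp only [ToyAccum, List.getD_cons_succ]
      exact ih (b + y) (fun z hz => hpos z (by simp [hz])) (by omega) j (by simpa using hi)

-- at and after the first exceeder, every prefix sum is > coin (needs sortedness, a ≤ coin)
theorem CutSpec_above (l : List Int) : ∀ (a coin : Int),
    l.Pairwise (· ≤ ·) → a ≤ coin →
    ∀ i, i < l.length → CutSpec coin (ToyAccum a l) ≤ i → (ToyAccum a l).getD i 0 > coin := by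
  induction l with
  | nil => intro a coin _ _ i hi; simp at hi
  | cons x r ih =>
    intro a coin hp ha i hi hcut
    have hx : ∀ y ∈ r, x ≤ y := (List.pairwise_cons.mp hp).1
    have hpr : r.Pairwise (· ≤ ·) := (List.pairwise_cons.mp hp).2
    simp only [ToyAccum, CutSpec] at hcut ⊢
    by_cases hax : a + x > coin
    · -- first exceeder at index 0: x > coin - a ≥ 0, so every later element is positive
      have hxpos : 0 < x := by omega
      cases i with
      | zero => simpa using hax
      | succ j =>
        simp only [List.getD_cons_succ]
        exact accum_pos_exceed coin r (a + x)
          (fun y hy => lt_of_lt_of_le hxpos (hx y hy)) hax j (by simpa using hi)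
    · rw [if_neg hax] at hcut
      cases i with
      | zero => omega
      | succ j =>
        simp only [List.getD_cons_succ]
        exact ih (a + x) coin hpr (by omega) j (by simpa using hi) (by omega)

-- binary-search correctness on a list partitioned at k
theorem BisectLoop_eq (p : List Int) (c : Int) (k : Nat)
    (hk : ∀ i, i < p.length → ((p.getD i 0 ≤ c) ↔ i < k)) :
    ∀ (lo hi : Nat), lo ≤ k → k ≤ hi → hi ≤ p.length → BisectLoop p c lo hi = k := by
  intro lo hi
  induction hn : hi - lo using Nat.strong_induction_on generalizing lo hi with
  | _ n ih =>
    intro hlo hhi hlen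
    rw [BisectLoop]
    by_cases h : lo < hi
    · rw [dif_pos h]
      have hmidlt : (lo + hi) / 2 < hi := by omega
      have hmidge : lo ≤ (lo + hi) / 2 := by omega
      have hmlen : (lo + hi) / 2 < p.length := by omega
      by_cases hc : c < p.getD ((lo + hi) / 2) 0
      · rw [if_pos hc]
        have : ¬ ((lo + hi) / 2 < k) := fun hlt => by
          have := (hk _ hmlen).mpr hlt; omega
        exact ih ((lo + hi) / 2 - lo) (by omega) lo ((lo + hi) / 2) rfl hlo (by omega) (by omega)
      · rw [if_neg hc]
        have : (lo + hi) / 2 < k := (hk _ hmlen).mp (by omega)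
        exact ih (hi - ((lo + hi) / 2 + 1)) (by omega) ((lo + hi) / 2 + 1) hi rfl (by omega) hhi hlen
    · rw [dif_neg h]; omega

-- ===== VERDICT (by name: the statement is the Claim_ definition above) =====
theorem Toy_spec : Claim_equal_Toy := by
  unfold Claim_equal_Toy
  intro arr coin _
  unfold Spec_Toy Toy Toy_alt
  set s := PySem.List.sorted arr (fun x => x) false with hs
  by_cases hc : coin ≥ 0
  · have hp : s.Pairwise (· ≤ ·) := PySem.List.sorted_pairwise arr (fun x => x)
    have hlist := ToyLoopA_eq_take s coin hp hc
    have hlenp : (ToyAccum 0 s).length = s.length := ToyAccum_length 0 s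
    have hkle : CutSpec coin (ToyAccum 0 s) ≤ s.length := by
      have := CutSpec_le coin (ToyAccum 0 s); omega
    have hbisect : BisectLoop (ToyAccum 0 s) coin 0 (ToyAccum 0 s).length
        = CutSpec coin (ToyAccum 0 s) := by
      refine BisectLoop_eq (ToyAccum 0 s) coin (CutSpec coin (ToyAccum 0 s)) ?_ 0
        (ToyAccum 0 s).length (by omega) (by omega) (le_refl _)
      intro i hi
      constructor
      · intro hle
        by_contra hnot
        have := CutSpec_above s 0 coin hp hc i (by omega) (by omega)
        omega
      · intro hlt
        exact CutSpec_below coin (ToyAccum 0 s) i hlt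
    simp only [if_pos hc, hbisect]
    refine Prod.ext ?_ ?_
    · simpa using hlist
    · simp [hlist, Nat.min_eq_left hkle]
  · have : ToyLoopA s coin [] = [] := by
      cases s <;> simp [ToyLoopA, hc]
    simp [this, if_neg hc]
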